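-- pv_equiv track=rewrite | github.com/msinclair-py/ProtLIpInt | training_data.py | get_binding_profile
-- ===== SOURCE A (Python) =====
-- def get_binding_profile(pairdata, smoothing_cutoff = 3):
--     # history is used to track the local binding history to handle edge cases
--     history = [0]*20
--     events = []
--     lastframe = pairdata[-1]
--
--     i = 0
--     while i <= lastframe:
--         # check if bound in this frame
--         bound = 1 if pairdata[0] == i else 0
--
--         if bound:
--             # if you have been bound within the hyst cutoff
--             # you are considered `resident`
--             resident = 1 if sum(history[:smoothing_cutoff]) > 0 else 0
--             history.insert(0, 1)
--             pairdata.pop(0)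
--
--         else:
--             resident = 0
--             history.insert(0, 0)
--
--             try:
--                 events.append(current)
--             except Exception as e:
--                 pass
--
--         history.pop()
--
--
--         if bound and resident:
--             current += 1
--         elif bound and not resident:
--             current = 1
--
--         i += 1
--
--     # need to check last frame for binding since this would not be appended otherwise
--     if sum(history[:smoothing_cutoff]) > 0:
--         events.append(current)
--
--     return events
-- ===== SOURCE B (Python) =====
-- def get_binding_profile(pairdata, smoothing_cutoff = 3):
--     # One pass with an index pointer (no destructive pop(0)); the recent-frame
--     # history is a fixed 20-flag window rebuilt by slicing each frame.
--     # Return value only: unlike a pop(0) loop, this never mutates pairdata.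
--     events = []
--     lastframe = pairdata[-1]
--     history = [0] * 20
--     ptr = 0
--     current = None
--     for i in range(lastframe + 1):
--         if ptr < len(pairdata) and pairdata[ptr] == i:
--             resident = any(history[:smoothing_cutoff])
--             current = current + 1 if resident else 1
--             history = [1] + history[:19]
--             ptr += 1
--         else:
--             if current is not None:
--                 events.append(current)
--             history = [0] + history[:19]
--     if any(history[:smoothing_cutoff]):
--         events.append(current)
--     return events
-- ===== Notes on version B (the rewrite author's own statement) =====
-- stated objective: faster
-- what changed: Replaces the destructive pop(0) scan of pairdata with an index pointer over an unmutated list and the insert/pop mutation of the 20-flag history with a slice rebuild plus any(); Pre_ excludes only the empty list, on which A raises IndexError reading the last element; B reads pairdata without mutating it, whereas A pops it empty in place.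
-- outside the precondition, e.g. on get_binding_profile([], 3): A raises IndexError, B raises IndexError
import Mathlib
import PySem

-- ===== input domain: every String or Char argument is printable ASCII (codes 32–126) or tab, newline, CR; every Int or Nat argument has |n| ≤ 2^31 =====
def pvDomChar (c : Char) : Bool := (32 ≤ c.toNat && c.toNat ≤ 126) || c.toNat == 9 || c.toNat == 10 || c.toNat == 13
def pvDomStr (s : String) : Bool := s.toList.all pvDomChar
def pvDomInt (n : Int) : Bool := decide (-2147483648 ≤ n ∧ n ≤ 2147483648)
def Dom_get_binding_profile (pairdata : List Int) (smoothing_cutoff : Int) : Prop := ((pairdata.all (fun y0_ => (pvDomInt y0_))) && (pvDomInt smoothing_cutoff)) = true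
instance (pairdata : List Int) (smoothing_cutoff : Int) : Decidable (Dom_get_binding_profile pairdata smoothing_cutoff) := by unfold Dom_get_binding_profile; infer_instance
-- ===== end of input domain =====

-- B replaces A's pop(0) on pairdata with an index pointer (objective: faster —
-- no quadratic front-popping) and rebuilds the 20-flag history window by
-- slicing instead of insert/pop.  Equivalence is about the RETURN value only:
-- Python A pops pairdata empty in place, B never mutates it.

-- ===== PORT A =====
-- loop state: (i, pairdata-remainder, history, events, current); returns (history, events, current).
-- `current` is Option Int: none = Python's `current` not yet assigned (the
-- try/except swallows the NameError in the unbound branch).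
def gbpLoopA (k : Int) : Nat → Int → List Int → List Int → List Int → Option Int →
    (List Int × List Int × Option Int)
  | 0, _, _, history, events, current => (history, events, current)
  | fuel+1, i, pd, history, events, current =>
    if pd.head? = some i then
      -- bound branch: resident from sum(history[:k]), insert 1, pop(0), then current update
      let resident : Bool := decide (0 < (PySem.List.slice history none (some k)).sum)
      let current' : Option Int :=
        if resident then (match current with | some c => some (c + 1) | none => none)
        else some 1
      gbpLoopA k fuel (i+1) pd.tail ((1 :: history).dropLast) events current'
    else
      -- unbound branch: insert 0, append current if it exists
      let events' := match current with | some c => events ++ [c] | none => events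
      gbpLoopA k fuel (i+1) pd ((0 :: history).dropLast) events' current

def get_binding_profile (pairdata : List Int) (smoothing_cutoff : Int) : List Int :=
  match PySem.List.pyGet? pairdata (-1) with
  | none => []          -- reading the last element raises IndexError in Python; excluded by Pre_
  | some lastframe =>
    let r := gbpLoopA smoothing_cutoff (lastframe + 1).toNat 0 pairdata
               (List.replicate 20 (0 : Int)) [] none
    if 0 < (PySem.List.slice r.1 none (some smoothing_cutoff)).sum then
      match r.2.2 with
      | some c => r.2.1 ++ [c]
      | none => r.2.1   -- unreachable: a 1 in history implies current was assigned
    else r.2.1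

-- ===== PORT B =====
-- B's per-frame step; state (ptr, current, history, events).
def gbpStepB (pairdata : List Int) (k : Int)
    (st : Nat × Option Int × List Int × List Int) (i : Int) :
    Nat × Option Int × List Int × List Int :=
  let (ptr, current, history, events) := st
  if ptr < pairdata.length ∧ pairdata.getD ptr 0 = i then
    let resident : Bool := (PySem.List.slice history none (some k)).any (fun x => decide (x ≠ 0))
    let current' : Option Int :=
      if resident then (match current with | some c => some (c + 1) | none => none)
      else some 1
    (ptr + 1, current', 1 :: history.take 19, events)
  else
    let events' := match current with | some c => events ++ [c] | none => events
    (ptr, current, 0 :: history.take 19, events')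

def get_binding_profile_alt (pairdata : List Int) (smoothing_cutoff : Int) : List Int :=
  match PySem.List.pyGet? pairdata (-1) with
  | none => []          -- reading the last element raises IndexError in Python; excluded by Pre_
  | some lastframe =>
    let st := (PySem.List.pyRange 0 (lastframe + 1) 1).foldl
      (gbpStepB pairdata smoothing_cutoff)
      (0, none, List.replicate 20 (0 : Int), [])
    if (PySem.List.slice st.2.2.1 none (some smoothing_cutoff)).any (fun x => decide (x ≠ 0)) then
      match st.2.1 with
      | some c => st.2.2.2 ++ [c]
      | none => st.2.2.2   -- unreachable: a 1 in history implies current was assigned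
    else st.2.2.2

-- ===== PRECONDITION & SPEC =====
-- Pre_ excludes only the empty list, on which A raises IndexError reading the last element.
def Pre_get_binding_profile (pairdata : List Int) (smoothing_cutoff : Int) : Prop := pairdata ≠ []
instance (pairdata : List Int) (smoothing_cutoff : Int) : Decidable (Pre_get_binding_profile pairdata smoothing_cutoff) := by unfold Pre_get_binding_profile; infer_instance
def pvWitness_get_binding_profile : List Int × Int := ([0, 1, 4, 5], 3)
def Spec_get_binding_profile (pairdata : List Int) (smoothing_cutoff : Int) (out : List Int) : Prop := out = get_binding_profile_alt pairdata smoothing_cutoff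
instance (pairdata : List Int) (smoothing_cutoff : Int) (out : List Int) : Decidable (Spec_get_binding_profile pairdata smoothing_cutoff out) := by unfold Spec_get_binding_profile; infer_instance

-- ===== CLAIM =====
def Claim_equal_get_binding_profile : Prop := ∀ (pairdata : List Int) (smoothing_cutoff : Int), Dom_get_binding_profile pairdata smoothing_cutoff → Pre_get_binding_profile pairdata smoothing_cutoff → Spec_get_binding_profile pairdata smoothing_cutoff (get_binding_profile pairdata smoothing_cutoff)

-- ===== LEMMAS AND PROOFS =====

-- history[:k] is always a prefix-like selection of history, so its members are members
theorem slice_to_subset (l : List Int) (k : Int) :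
    PySem.List.slice l none (some k) ⊆ l := by
  by_cases hk : 0 ≤ k
  · have : k = ((k.toNat : Nat) : Int) := by omega
    rw [this, PySem.List.slice_to_natCast]
    exact List.take_subset _ _
  · have h0 : 0 < (-k).toNat := by omega
    have : k = -(((-k).toNat : Nat) : Int) := by omega
    rw [this, PySem.List.slice_to_neg_natCast _ _ h0]
    exact List.take_subset _ _

-- on 0/1 lists, A's `sum(...) > 0` is B's `any(...)`
theorem sum_pos_iff_any (xs : List Int) (h : ∀ x ∈ xs, x = 0 ∨ x = 1) :
    (0 < xs.sum) ↔ (xs.any (fun x => decide (x ≠ 0)) = true) := by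
  induction xs with
  | nil => simp
  | cons x t ih =>
    have hx := h x (by simp)
    have ht : ∀ y ∈ t, y = 0 ∨ y = 1 := fun y hy => h y (by simp [hy])
    have hsum : 0 ≤ t.sum := by
      clear ih h hx
      induction t with
      | nil => simp
      | cons y s ihs =>
        have := ht y (by simp)
        have hs := ihs (fun z hz => ht z (by simp [hz]))
        simp only [List.sum_cons]; omega
    rw [List.any_cons, List.sum_cons]
    rcases hx with h0 | h1
    · subst h0
      rw [decide_eq_false (by simp), Bool.false_or, zero_add]
      exact ih ht
    · subst h1
      rw [decide_eq_true (by norm_num), Bool.true_or]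
      constructor
      · intro _; rfl
      · intro _; omega

-- A's insert-then-pop on a 20-list is B's cons-then-take
theorem dropLast_cons_20 (x : Int) (h : List Int) (hlen : h.length = 20) :
    (x :: h).dropLast = x :: h.take 19 := by
  rw [List.dropLast_eq_take]
  simp [hlen]

-- A's `pairdata[0] == i` on the popped remainder vs B's pointer test
theorem gbp_bound_iff (pairdata : List Int) (ptr : Nat) (i : Int) :
    (pairdata.drop ptr).head? = some i ↔
      (ptr < pairdata.length ∧ pairdata.getD ptr 0 = i) := by
  rw [List.head?_drop]
  constructor
  · intro h
    obtain ⟨hlt, hv⟩ := List.getElem?_eq_some_iff.mp h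
    exact ⟨hlt, by rw [List.getD_eq_getElem _ _ hlt, hv]⟩
  · rintro ⟨hlt, hv⟩
    rw [List.getElem?_eq_some_iff]
    exact ⟨hlt, by rw [List.getD_eq_getElem _ _ hlt] at hv; exact hv⟩

-- Main loop correspondence: A's fuel loop over the popped list equals B's fold
-- over range with a pointer, with identical history/events/current; the history
-- stays a 20-long 0/1 list.
theorem gbp_loop_equiv (pd : List Int) (k : Int) :
    ∀ (fuel : Nat) (i : Int) (ptr : Nat) (h ev : List Int) (cur : Option Int),
      h.length = 20 → (∀ x ∈ h, x = 0 ∨ x = 1) →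
      (gbpLoopA k fuel i (pd.drop ptr) h ev cur =
        (((PySem.List.pyRange i (i + fuel) 1).foldl (gbpStepB pd k) (ptr, cur, h, ev)).2.2.1,
         ((PySem.List.pyRange i (i + fuel) 1).foldl (gbpStepB pd k) (ptr, cur, h, ev)).2.2.2,
         ((PySem.List.pyRange i (i + fuel) 1).foldl (gbpStepB pd k) (ptr, cur, h, ev)).2.1)) ∧
      (gbpLoopA k fuel i (pd.drop ptr) h ev cur).1.length = 20 ∧
      (∀ x ∈ (gbpLoopA k fuel i (pd.drop ptr) h ev cur).1, x = 0 ∨ x = 1) := by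
  intro fuel
  induction fuel with
  | zero =>
    intro i ptr h ev cur hlen h01
    rw [PySem.List.pyRange_one_eq_nil (by omega)]
    exact ⟨rfl, hlen, h01⟩
  | succ n ih =>
    intro i ptr h ev cur hlen h01
    have hcons : PySem.List.pyRange i (i + (n+1 : Nat)) 1
        = i :: PySem.List.pyRange (i+1) (i + (n+1 : Nat)) 1 :=
      PySem.List.pyRange_one_cons (by push_cast; omega)
    have hhi : i + ((n+1 : Nat) : Int) = (i + 1) + (n : Int) := by push_cast; ring
    have hlen' : ∀ b : Int, (b :: h.take 19).length = 20 := by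
      intro b; simp [List.length_take, hlen]
    have h01' : ∀ b : Int, b = 0 ∨ b = 1 → ∀ x ∈ (b :: h.take 19), x = 0 ∨ x = 1 := by
      intro b hb x hx
      rcases List.mem_cons.mp hx with hx | hx
      · subst hx; exact hb
      · exact h01 x (List.take_subset _ _ hx)
    rw [hcons, List.foldl_cons]
    by_cases hb : (pd.drop ptr).head? = some i
    · have hb' : ptr < pd.length ∧ pd.getD ptr 0 = i := (gbp_bound_iff pd ptr i).mp hb
      have hres : decide (0 < (PySem.List.slice h none (some k)).sum)
          = (PySem.List.slice h none (some k)).any (fun x => decide (x ≠ 0)) := by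
        have hsub := slice_to_subset h k
        have := sum_pos_iff_any (PySem.List.slice h none (some k))
          (fun x hx => h01 x (hsub hx))
        by_cases hp : 0 < (PySem.List.slice h none (some k)).sum
        · rw [decide_eq_true hp, (this.mp hp)]
        · rw [decide_eq_false hp]
          rcases hB : (PySem.List.slice h none (some k)).any (fun x => decide (x ≠ 0)) with _ | _
          · rfl
          · exact absurd (this.mpr hB) hp
      have htail : (pd.drop ptr).tail = pd.drop (ptr + 1) := by rw [List.tail_drop]
      simp only [gbpLoopA, gbpStepB, if_pos hb, if_pos hb']
      rw [htail, dropLast_cons_20 _ _ hlen, hres, hhi]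
      exact ih (i+1) (ptr+1) (1 :: h.take 19) ev _ (hlen' 1) (h01' 1 (Or.inr rfl))
    · have hb' : ¬ (ptr < pd.length ∧ pd.getD ptr 0 = i) :=
        fun hc => hb ((gbp_bound_iff pd ptr i).mpr hc)
      simp only [gbpLoopA, gbpStepB, if_neg hb, if_neg hb']
      rw [dropLast_cons_20 _ _ hlen, hhi]
      exact ih (i+1) ptr (0 :: h.take 19) _ cur (hlen' 0) (h01' 0 (Or.inl rfl))

-- ===== VERDICT =====
theorem get_binding_profile_spec : Claim_equal_get_binding_profile := by
  intro pairdata k _hdom hpre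
  unfold Spec_get_binding_profile
  unfold get_binding_profile get_binding_profile_alt
  have hn : 0 < pairdata.length := List.length_pos_iff.mpr hpre
  obtain ⟨lf, hlf⟩ : ∃ v, PySem.List.pyGet? pairdata (-1) = some v := by
    simp only [PySem.List.pyGet?, PySem.List.pyIdx?]
    rw [if_neg (by norm_num : ¬ (0:Int) ≤ -1),
      if_pos (by omega : -(pairdata.length : Int) ≤ -1)]
    exact ⟨_, List.getElem?_eq_getElem (by omega)⟩
  rw [hlf]
  dsimp only
  have hrange : PySem.List.pyRange 0 (lf + 1) 1
      = PySem.List.pyRange 0 (0 + ((lf + 1).toNat : Int)) 1 := by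
    by_cases hlf0 : 0 ≤ lf + 1
    · congr 1; omega
    · rw [PySem.List.pyRange_one_eq_nil (by omega),
        PySem.List.pyRange_one_eq_nil (by omega)]
  obtain ⟨heq, hlen, h01⟩ := gbp_loop_equiv pairdata k (lf + 1).toNat 0 0
    (List.replicate 20 (0 : Int)) [] none (by simp)
    (by intro x hx; left; exact List.eq_of_mem_replicate hx)
  rw [List.drop_zero] at heq hlen h01
  rw [hrange]
  set st := (PySem.List.pyRange 0 (0 + ((lf + 1).toNat : Int)) 1).foldl
    (gbpStepB pairdata k) (0, none, List.replicate 20 (0 : Int), []) with hst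
  rw [heq]
  dsimp only
  rw [heq] at hlen h01
  dsimp only at hlen h01
  have hres : decide (0 < (PySem.List.slice st.2.2.1 none (some k)).sum)
      = (PySem.List.slice st.2.2.1 none (some k)).any (fun x => decide (x ≠ 0)) := by
    have hsub := slice_to_subset st.2.2.1 k
    have hiff := sum_pos_iff_any (PySem.List.slice st.2.2.1 none (some k))
      (fun x hx => h01 x (hsub hx))
    by_cases hp : 0 < (PySem.List.slice st.2.2.1 none (some k)).sum
    · rw [decide_eq_true hp, hiff.mp hp]
    · rw [decide_eq_false hp]
      rcases hB : (PySem.List.slice st.2.2.1 none (some k)).any (fun x => decide (x ≠ 0)) with _ | _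
      · rfl
      · exact absurd (hiff.mpr hB) hp
  by_cases hp : 0 < (PySem.List.slice st.2.2.1 none (some k)).sum
  · rw [if_pos hp, if_pos (by rw [← hres]; exact decide_eq_true hp)]
  · rw [if_neg hp, if_neg (by rw [← hres]; simpa using hp)]
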